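-- pv_equiv track=rewrite | github.com/flytohub/flyto-indexer | src/tools/type_contracts.py | _split_generic_args
-- ===== SOURCE A (Python) =====
-- def _split_generic_args(type_str: str, delimiter: str = ',') -> list:
--     """Split type arguments respecting bracket depth.
--
--     Handles nested generics like Union[Dict[str, int], List[str]].
--     """
--     parts = []
--     depth = 0
--     current = []
--     for ch in type_str:
--         if ch in ('[', '<', '('):
--             depth += 1
--             current.append(ch)
--         elif ch in (']', '>', ')'):
--             depth -= 1
--             current.append(ch)
--         elif ch == delimiter and depth == 0:
--             parts.append(''.join(current).strip())
--             current = []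
--         else:
--             current.append(ch)
--     remainder = ''.join(current).strip()
--     if remainder:
--         parts.append(remainder)
--     return parts
-- ===== SOURCE B (Python) =====
-- def _split_generic_args(type_str: str, delimiter: str = ',') -> list:
--     """Split type arguments respecting bracket depth (find-cut-and-slice)."""
--     def cut(s):
--         depth = 0
--         for i, ch in enumerate(s):
--             if ch in ('[', '<', '('):
--                 depth += 1
--             elif ch in (']', '>', ')'):
--                 depth -= 1
--             elif ch == delimiter and depth == 0:
--                 return i
--         return -1
--     parts = []
--     rest = type_str
--     while True:
--         i = cut(rest)
--         if i < 0:
--             break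
--         parts.append(rest[:i].strip())
--         rest = rest[i + 1:]
--     last = rest.strip()
--     if last:
--         parts.append(last)
--     return parts
-- ===== Notes on version B (the rewrite author's own statement) =====
-- stated objective: alternative
-- what changed: Replaces the single-pass buffer-accumulating state machine with a find-cut-and-slice decomposition: a helper scans for the first depth-0 delimiter index, the string is sliced there and the loop repeats on the remainder.
import Mathlib
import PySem

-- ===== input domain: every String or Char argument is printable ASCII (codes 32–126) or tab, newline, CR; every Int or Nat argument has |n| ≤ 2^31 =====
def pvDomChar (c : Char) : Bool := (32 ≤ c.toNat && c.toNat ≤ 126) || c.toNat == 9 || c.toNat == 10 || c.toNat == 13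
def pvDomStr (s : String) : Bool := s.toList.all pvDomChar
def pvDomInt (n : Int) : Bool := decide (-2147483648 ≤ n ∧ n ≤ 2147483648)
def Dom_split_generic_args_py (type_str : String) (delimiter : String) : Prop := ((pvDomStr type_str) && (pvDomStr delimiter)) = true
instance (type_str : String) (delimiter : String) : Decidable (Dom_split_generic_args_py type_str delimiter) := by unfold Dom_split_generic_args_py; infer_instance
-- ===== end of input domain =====

-- B replaces A's buffer-accumulating state machine by a find-first-cut-then-slice loop; same cost, different decomposition.

-- ===== PORT A =====
-- ''.join(current).strip() is ported as String.mk (PySem.Chars.strip current) (join = String.mk, strip exact on Char lists)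
def splitA_step (delimiter : String) : (List String × Int × List Char) → Char → (List String × Int × List Char)
  | (parts, depth, current), ch =>
    if ch = '[' ∨ ch = '<' ∨ ch = '(' then (parts, depth + 1, current ++ [ch])
    else if ch = ']' ∨ ch = '>' ∨ ch = ')' then (parts, depth - 1, current ++ [ch])
    else if String.mk [ch] = delimiter ∧ depth = 0 then
      (parts ++ [String.mk (PySem.Chars.strip current)], depth, ([] : List Char))
    else (parts, depth, current ++ [ch])

def split_generic_args_py (type_str : String) (delimiter : String) : List String :=
  let st := type_str.toList.foldl (splitA_step delimiter) ([], 0, [])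
  let remainder := PySem.Chars.strip st.2.2
  if remainder ≠ [] then st.1 ++ [String.mk remainder] else st.1

-- ===== PORT B =====
-- cut(s): index of the first delimiter character at bracket depth 0 (none = Python's -1)
def findCut (delimiter : String) : List Char → Int → Option Nat
  | [], _ => none
  | ch :: s, depth =>
    if ch = '[' ∨ ch = '<' ∨ ch = '(' then (findCut delimiter s (depth + 1)).map (· + 1)
    else if ch = ']' ∨ ch = '>' ∨ ch = ')' then (findCut delimiter s (depth - 1)).map (· + 1)
    else if String.mk [ch] = delimiter ∧ depth = 0 then some 0
    else (findCut delimiter s depth).map (· + 1)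

-- termination fact for the slicing loop (cited by the port's decreasing_by)
theorem findCut_lt (delimiter : String) (s : List Char) (depth : Int) (i : Nat)
    (h : findCut delimiter s depth = some i) : i < s.length := by
  induction s generalizing depth i with
  | nil => simp [findCut] at h
  | cons ch s ih =>
    simp only [findCut] at h
    split_ifs at h
    all_goals first
      | (simp only [Option.map_eq_some_iff] at h
         obtain ⟨j, hj, rfl⟩ := h
         exact Nat.succ_lt_succ (ih _ _ hj))
      | (injection h with h
         simp only [List.length_cons]
         omega)

-- rest[:i] / rest[i+1:] are List.take / List.drop: i is a nonnegative in-range index, where Python slicing is exact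
def splitB_go (delimiter : String) (rest : List Char) (parts : List String) : List String :=
  match h : findCut delimiter rest 0 with
  | none =>
    let last := PySem.Chars.strip rest
    if last ≠ [] then parts ++ [String.mk last] else parts
  | some i => splitB_go delimiter (rest.drop (i + 1)) (parts ++ [String.mk (PySem.Chars.strip (rest.take i))])
termination_by rest.length
decreasing_by
  have := findCut_lt delimiter rest 0 i h
  simp only [List.length_drop]; omega

def split_generic_args_py_alt (type_str : String) (delimiter : String) : List String :=
  splitB_go delimiter type_str.toList []

-- ===== PRECONDITION & SPEC =====
def Spec_split_generic_args_py (type_str : String) (delimiter : String) (out : List String) : Prop := out = split_generic_args_py_alt type_str delimiter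
instance (type_str : String) (delimiter : String) (out : List String) : Decidable (Spec_split_generic_args_py type_str delimiter out) := by unfold Spec_split_generic_args_py; infer_instance

-- ===== CLAIM (what is proved, stated in full; the proofs are below) =====
def Claim_equal_split_generic_args_py : Prop := ∀ (type_str : String) (delimiter : String), Dom_split_generic_args_py type_str delimiter → Spec_split_generic_args_py type_str delimiter (split_generic_args_py type_str delimiter)

-- ===== LEMMAS AND PROOFS =====

-- intermediate characterisation: (completed raw segments, trailing segment) of the depth-aware split
def prependSeg (c : Char) : List (List Char) × List Char → List (List Char) × List Char
  | ([], t) => ([], c :: t)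
  | (p :: ps, t) => ((c :: p) :: ps, t)

def segs (delimiter : String) : List Char → Int → List (List Char) × List Char
  | [], _ => ([], [])
  | ch :: s, depth =>
    if ch = '[' ∨ ch = '<' ∨ ch = '(' then prependSeg ch (segs delimiter s (depth + 1))
    else if ch = ']' ∨ ch = '>' ∨ ch = ')' then prependSeg ch (segs delimiter s (depth - 1))
    else if String.mk [ch] = delimiter ∧ depth = 0 then
      (([] : List Char) :: (segs delimiter s depth).1, (segs delimiter s depth).2)
    else prependSeg ch (segs delimiter s depth)

def finishSegs (parts : List String) (cur : List Char) : List (List Char) × List Char → List String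
  | ([], t) =>
    let l := PySem.Chars.strip (cur ++ t)
    if l ≠ [] then parts ++ [String.mk l] else parts
  | (p :: ps, t) => finishSegs (parts ++ [String.mk (PySem.Chars.strip (cur ++ p))]) [] (ps, t)

theorem finishSegs_prepend (parts : List String) (cur : List Char) (c : Char)
    (r : List (List Char) × List Char) :
    finishSegs parts cur (prependSeg c r) = finishSegs parts (cur ++ [c]) r := by
  obtain ⟨ps, t⟩ := r
  cases ps with
  | nil => simp [prependSeg, finishSegs]
  | cons p ps => simp [prependSeg, finishSegs]

def finA (st : List String × Int × List Char) : List String :=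
  if PySem.Chars.strip st.2.2 ≠ [] then st.1 ++ [String.mk (PySem.Chars.strip st.2.2)] else st.1

theorem foldA_eq_finishSegs (delimiter : String) (s : List Char) :
    ∀ (parts : List String) (depth : Int) (cur : List Char),
    finA (s.foldl (splitA_step delimiter) (parts, depth, cur))
      = finishSegs parts cur (segs delimiter s depth) := by
  induction s with
  | nil => intro parts depth cur; simp [segs, finishSegs, finA]
  | cons ch s ih =>
    intro parts depth cur
    simp only [List.foldl_cons, segs, splitA_step]
    split_ifs with h1 h2 h3
    · rw [ih, finishSegs_prepend]
    · rw [ih, finishSegs_prepend]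
    · rw [ih]
      simp [finishSegs]
    · rw [ih, finishSegs_prepend]

theorem findCut_none_segs (delimiter : String) (s : List Char) :
    ∀ depth : Int, findCut delimiter s depth = none → segs delimiter s depth = ([], s) := by
  induction s with
  | nil => intro depth _; simp [segs]
  | cons ch s ih =>
    intro depth h
    simp only [findCut] at h
    simp only [segs]
    split_ifs at h ⊢
    all_goals
      simp only [Option.map_eq_none_iff] at h
      rw [ih _ h]
      simp [prependSeg]

theorem findCut_some_segs (delimiter : String) (s : List Char) :
    ∀ (depth : Int) (i : Nat), findCut delimiter s depth = some i →
    segs delimiter s depth =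
      ((s.take i) :: (segs delimiter (s.drop (i + 1)) 0).1, (segs delimiter (s.drop (i + 1)) 0).2) := by
  induction s with
  | nil => intro depth i h; simp [findCut] at h
  | cons ch s ih =>
    intro depth i h
    simp only [findCut] at h
    simp only [segs]
    split_ifs at h ⊢ with h1 h2 h3
    all_goals first
      | (simp only [Option.map_eq_some_iff] at h
         obtain ⟨j, hj, rfl⟩ := h
         rw [ih _ _ hj]
         simp [prependSeg, List.take_succ_cons, List.drop_succ_cons])
      | (obtain ⟨hd, h0⟩ := h3
         injection h with h
         subst h
         subst h0
         simp)

theorem splitB_go_eq_finishSegs (delimiter : String) (rest : List Char) (parts : List String) :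
    splitB_go delimiter rest parts = finishSegs parts [] (segs delimiter rest 0) := by
  induction rest, parts using splitB_go.induct delimiter with
  | case1 rest parts h hlast =>
    rw [splitB_go.eq_def, findCut_none_segs _ _ _ h]
    split
    next => simp only [finishSegs, List.nil_append]
    next i h2 => rw [h] at h2; exact absurd h2 (by simp)
  | case2 rest parts h hlast =>
    rw [splitB_go.eq_def, findCut_none_segs _ _ _ h]
    split
    next => simp only [finishSegs, List.nil_append]
    next i h2 => rw [h] at h2; exact absurd h2 (by simp)
  | case3 rest parts i h ih =>
    rw [splitB_go.eq_def, findCut_some_segs _ _ _ _ h]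
    split
    next h2 => rw [h] at h2; exact absurd h2 (by simp)
    next j h2 =>
      rw [h] at h2
      injection h2 with h2
      subst h2
      rw [ih]
      simp [finishSegs]

-- ===== VERDICT (by name: the statement is the Claim_ definition above) =====
theorem split_generic_args_py_spec : Claim_equal_split_generic_args_py := by
  intro type_str delimiter _
  unfold Spec_split_generic_args_py split_generic_args_py split_generic_args_py_alt
  rw [splitB_go_eq_finishSegs]
  exact foldA_eq_finishSegs delimiter type_str.toList [] 0 []
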